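-- pv_equiv track=rewrite | github.com/moneyperfect/NASMusicBox | main.py | dominant_qqmusic_failure
-- ===== SOURCE A (Python) =====
-- from typing import Any, Optional
--
-- QQMUSIC_FAILURE_EMPTY_PURL = "empty_purl"
--
-- QQMUSIC_FAILURE_PREVIEW_ONLY = "preview_only"
--
-- QQMUSIC_FAILURE_VIP_REQUIRED = "vip_required"
--
-- QQMUSIC_FAILURE_COPYRIGHT_RESTRICTED = "copyright_restricted"
--
-- QQMUSIC_FAILURE_HTTP_403 = "http_403"
--
-- QQMUSIC_FAILURE_NETWORK = "network_error"
--
-- QQMUSIC_FAILURE_UNKNOWN = "unknown"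
--
-- def dominant_qqmusic_failure(attempts: list[dict[str, Any]]) -> str:
--     reasons = [str(item.get("reason") or "") for item in attempts if item.get("reason")]
--     for preferred in (
--         QQMUSIC_FAILURE_VIP_REQUIRED,
--         QQMUSIC_FAILURE_COPYRIGHT_RESTRICTED,
--         QQMUSIC_FAILURE_PREVIEW_ONLY,
--         QQMUSIC_FAILURE_HTTP_403,
--         QQMUSIC_FAILURE_EMPTY_PURL,
--         QQMUSIC_FAILURE_NETWORK,
--     ):
--         if preferred in reasons:
--             return preferred
--     return reasons[-1] if reasons else QQMUSIC_FAILURE_UNKNOWN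
-- ===== SOURCE B (Python) =====
-- QQMUSIC_FAILURE_UNKNOWN = "unknown"
--
-- _PRIORITY = (
--     "vip_required",
--     "copyright_restricted",
--     "preview_only",
--     "http_403",
--     "empty_purl",
--     "network_error",
-- )
-- _RANK = {s: i for i, s in enumerate(_PRIORITY)}
--
-- def dominant_qqmusic_failure(attempts: list) -> str:
--     best = None        # minimal rank of any priority reason seen
--     last_seen = None   # last truthy reason seen
--     for item in attempts:
--         r = item.get("reason")
--         if not r:
--             continue
--         s = str(r)
--         last_seen = s
--         rank = _RANK.get(s)
--         if rank is not None and (best is None or rank < best):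
--             best = rank
--     if best is not None:
--         return _PRIORITY[best]
--     return last_seen if last_seen is not None else QQMUSIC_FAILURE_UNKNOWN
-- ===== Notes on version B (the rewrite author's own statement) =====
-- stated objective: alternative
-- what changed: Replaces A's build-a-reasons-list-then-six-membership-scans with a single pass that keeps the minimum rank (via a precomputed priority->rank dict) and the last truthy reason, selecting the answer after the loop.
import Mathlib
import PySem

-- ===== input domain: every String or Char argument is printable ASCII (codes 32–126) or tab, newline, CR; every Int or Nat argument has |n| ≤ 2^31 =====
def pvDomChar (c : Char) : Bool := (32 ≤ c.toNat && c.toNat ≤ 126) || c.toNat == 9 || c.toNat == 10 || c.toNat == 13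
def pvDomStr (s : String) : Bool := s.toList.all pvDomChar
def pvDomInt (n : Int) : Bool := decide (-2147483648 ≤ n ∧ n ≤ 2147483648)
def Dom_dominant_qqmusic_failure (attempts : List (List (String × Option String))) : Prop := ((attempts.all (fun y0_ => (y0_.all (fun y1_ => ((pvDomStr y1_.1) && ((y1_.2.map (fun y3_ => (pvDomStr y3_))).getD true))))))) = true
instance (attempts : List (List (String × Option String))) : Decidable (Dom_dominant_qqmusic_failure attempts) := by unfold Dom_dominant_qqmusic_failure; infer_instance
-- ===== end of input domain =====

-- B replaces A's six membership scans over the reasons list by one pass keeping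
-- the minimum priority rank (rank dict) and the last truthy reason (objective: alternative).

-- shared helper: `item.get("reason")` with Python truthiness (None and "" are falsy),
-- then `str(... )`; returns the reason string when truthy
def pvReason? (item : List (String × Option String)) : Option String :=
  match PySem.Dict.get? (PySem.Dict.mk item) "reason" with
  | some (some s) => if s = "" then none else some s
  | _ => none

-- ===== PORT A =====
def dominant_qqmusic_failure (attempts : List (List (String × Option String))) : String :=
  let reasons := attempts.filterMap pvReason?
  if reasons.contains "vip_required" then "vip_required"
  else if reasons.contains "copyright_restricted" then "copyright_restricted"
  else if reasons.contains "preview_only" then "preview_only"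
  else if reasons.contains "http_403" then "http_403"
  else if reasons.contains "empty_purl" then "empty_purl"
  else if reasons.contains "network_error" then "network_error"
  else match reasons.getLast? with  -- reasons[-1] if reasons else UNKNOWN
       | some s => s
       | none => "unknown"

-- ===== PORT B =====
def pvPriority : List String :=
  ["vip_required", "copyright_restricted", "preview_only", "http_403", "empty_purl", "network_error"]

-- _RANK = {s: i for i, s in enumerate(_PRIORITY)}
def pvRank : PySem.Dict String Nat :=
  PySem.Dict.mk [("vip_required", 0), ("copyright_restricted", 1), ("preview_only", 2),
                 ("http_403", 3), ("empty_purl", 4), ("network_error", 5)]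

-- loop body of Source B: state = (best rank so far, last truthy reason seen)
def pvStep (st : Option Nat × Option String) (item : List (String × Option String)) :
    Option Nat × Option String :=
  match pvReason? item with
  | none => st
  | some s =>
    let best :=
      match PySem.Dict.get? pvRank s with
      | none => st.1
      | some r =>
        match st.1 with
        | none => some r
        | some b => some (if r < b then r else b)
    (best, some s)

def dominant_qqmusic_failure_alt (attempts : List (List (String × Option String))) : String :=
  let st := attempts.foldl pvStep (none, none)
  match st.1 with
  | some b => pvPriority.getD b ""   -- _PRIORITY[best]; best ≤ 5 so the default is never used
  | none =>
    match st.2 with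
    | some s => s
    | none => "unknown"

-- ===== PRECONDITION & SPEC =====
def Spec_dominant_qqmusic_failure (attempts : List (List (String × Option String))) (out : String) : Prop := out = dominant_qqmusic_failure_alt attempts
instance (attempts : List (List (String × Option String))) (out : String) : Decidable (Spec_dominant_qqmusic_failure attempts out) := by unfold Spec_dominant_qqmusic_failure; infer_instance

-- ===== CLAIM (what is proved, stated in full; the proofs are below) =====
def Claim_equal_dominant_qqmusic_failure : Prop := ∀ (attempts : List (List (String × Option String))), Dom_dominant_qqmusic_failure attempts → Spec_dominant_qqmusic_failure attempts (dominant_qqmusic_failure attempts)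

-- ===== LEMMAS AND PROOFS =====

-- reason-level step: pvStep after the reason has been extracted
def pvStepR (st : Option Nat × Option String) (s : String) : Option Nat × Option String :=
  (match PySem.Dict.get? pvRank s with
   | none => st.1
   | some r =>
     match st.1 with
     | none => some r
     | some b => some (if r < b then r else b), some s)

-- combine two optional ranks by minimum
def omin : Option Nat → Option Nat → Option Nat
  | none, b => b
  | some x, none => some x
  | some x, some y => some (min x y)

-- minimum rank over a reason list
def mr : List String → Option Nat
  | [] => none
  | s :: t => omin (PySem.Dict.get? pvRank s) (mr t)

-- A's selection, expressed on the reason list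
def firstIdx (rs : List String) : Option Nat :=
  if rs.contains "vip_required" then some 0
  else if rs.contains "copyright_restricted" then some 1
  else if rs.contains "preview_only" then some 2
  else if rs.contains "http_403" then some 3
  else if rs.contains "empty_purl" then some 4
  else if rs.contains "network_error" then some 5
  else none

theorem foldl_step_eq (l : List (List (String × Option String))) (st : Option Nat × Option String) :
    l.foldl pvStep st = (l.filterMap pvReason?).foldl pvStepR st := by
  induction l generalizing st with
  | nil => rfl
  | cons x t ih =>
    simp only [List.foldl_cons, List.filterMap_cons]
    cases h : pvReason? x with
    | none => simp [pvStep, h, ih]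
    | some s => simp [List.foldl_cons, ih]; congr 1; simp [pvStep, pvStepR, h]

theorem foldl_stepR_snd (rs : List String) (st : Option Nat × Option String) :
    (rs.foldl pvStepR st).2 = rs.getLast?.or st.2 := by
  induction rs generalizing st with
  | nil => rfl
  | cons s t ih =>
    simp only [List.foldl_cons, ih]
    cases h : t.getLast? with
    | none =>
      have : t = [] := List.getLast?_eq_none_iff.mp h
      subst this; rfl
    | some y =>
      have h2 : (s :: t).getLast? = some y := by
        cases t with
        | nil => simp at h
        | cons a b => simpa [List.getLast?_cons_cons] using h
      simp [h2, pvStepR]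

theorem omin_none (b : Option Nat) : omin none b = b := rfl

theorem omin_assoc (a b c : Option Nat) : omin (omin a b) c = omin a (omin b c) := by
  cases a <;> cases b <;> cases c <;> simp [omin, Nat.min_assoc]

theorem stepR_fst (st : Option Nat × Option String) (s : String) :
    (pvStepR st s).1 = omin st.1 (PySem.Dict.get? pvRank s) := by
  cases h : PySem.Dict.get? pvRank s with
  | none => cases hb : st.1 <;> simp [pvStepR, h, hb, omin]
  | some r =>
    cases hb : st.1 with
    | none => simp [pvStepR, h, hb, omin]
    | some b =>
      simp [pvStepR, h, hb, omin]
      split_ifs <;> omega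

theorem foldl_stepR_fst (rs : List String) (st : Option Nat × Option String) :
    (rs.foldl pvStepR st).1 = omin st.1 (mr rs) := by
  induction rs generalizing st with
  | nil => cases hb : st.1 <;> simp [mr, hb, omin]
  | cons s t ih =>
    simp only [List.foldl_cons, ih, stepR_fst, mr]
    rw [omin_assoc]

theorem rank_cases (s : String) :
    (s = "vip_required" ∧ pvRank.get? s = some 0) ∨
    (s = "copyright_restricted" ∧ pvRank.get? s = some 1) ∨
    (s = "preview_only" ∧ pvRank.get? s = some 2) ∨
    (s = "http_403" ∧ pvRank.get? s = some 3) ∨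
    (s = "empty_purl" ∧ pvRank.get? s = some 4) ∨
    (s = "network_error" ∧ pvRank.get? s = some 5) ∨
    (pvRank.get? s = none ∧ ("vip_required" == s) = false ∧ ("copyright_restricted" == s) = false ∧
      ("preview_only" == s) = false ∧ ("http_403" == s) = false ∧ ("empty_purl" == s) = false ∧
      ("network_error" == s) = false) := by
  by_cases h0 : s = "vip_required"
  · subst h0; exact Or.inl ⟨rfl, by decide⟩
  by_cases h1 : s = "copyright_restricted"
  · subst h1; exact Or.inr (Or.inl ⟨rfl, by decide⟩)
  by_cases h2 : s = "preview_only"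
  · subst h2; exact Or.inr (Or.inr (Or.inl ⟨rfl, by decide⟩))
  by_cases h3 : s = "http_403"
  · subst h3; exact Or.inr (Or.inr (Or.inr (Or.inl ⟨rfl, by decide⟩)))
  by_cases h4 : s = "empty_purl"
  · subst h4; exact Or.inr (Or.inr (Or.inr (Or.inr (Or.inl ⟨rfl, by decide⟩))))
  by_cases h5 : s = "network_error"
  · subst h5; exact Or.inr (Or.inr (Or.inr (Or.inr (Or.inr (Or.inl ⟨rfl, by decide⟩)))))
  refine Or.inr (Or.inr (Or.inr (Or.inr (Or.inr (Or.inr ⟨?_, ?_, ?_, ?_, ?_, ?_, ?_⟩)))))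
  · simp [pvRank, PySem.Dict.get?, beq_iff_eq, Ne.symm h0, Ne.symm h1,
          Ne.symm h2, Ne.symm h3, Ne.symm h4, Ne.symm h5]
  all_goals simp [beq_eq_false_iff_ne]
  · exact Ne.symm h0
  · exact Ne.symm h1
  · exact Ne.symm h2
  · exact Ne.symm h3
  · exact Ne.symm h4
  · exact Ne.symm h5

theorem mr_eq_firstIdx (rs : List String) : mr rs = firstIdx rs := by
  induction rs with
  | nil => rfl
  | cons s t ih =>
    simp only [mr, ih]
    rcases rank_cases s with ⟨rfl, hg⟩ | ⟨rfl, hg⟩ | ⟨rfl, hg⟩ | ⟨rfl, hg⟩ | ⟨rfl, hg⟩ | ⟨rfl, hg⟩ |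
      ⟨hg, b0, b1, b2, b3, b4, b5⟩ <;>
    rw [hg] <;>
    [skip; skip; skip; skip; skip; skip;
     simp only [firstIdx, List.contains_cons, b0, b1, b2, b3, b4, b5, Bool.false_or, omin_none]] <;>
    (simp only [firstIdx, List.contains_cons, String.reduceBEq, beq_self_eq_true, Bool.false_or,
                Bool.true_or, if_true];
     split_ifs <;> simp [omin])

theorem a_eq (attempts : List (List (String × Option String))) :
    dominant_qqmusic_failure attempts =
      (match firstIdx (attempts.filterMap pvReason?) with
       | some b => pvPriority.getD b ""
       | none =>
         match (attempts.filterMap pvReason?).getLast? with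
         | some s => s
         | none => "unknown") := by
  simp only [dominant_qqmusic_failure, firstIdx]
  split_ifs <;> rfl

theorem b_eq (attempts : List (List (String × Option String))) :
    dominant_qqmusic_failure_alt attempts =
      (match firstIdx (attempts.filterMap pvReason?) with
       | some b => pvPriority.getD b ""
       | none =>
         match (attempts.filterMap pvReason?).getLast? with
         | some s => s
         | none => "unknown") := by
  simp only [dominant_qqmusic_failure_alt]
  rw [foldl_step_eq, foldl_stepR_fst, foldl_stepR_snd, mr_eq_firstIdx, omin_none, Option.or_none]

-- ===== VERDICT (by name: the statement is the Claim_ definition above) =====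
theorem dominant_qqmusic_failure_spec : Claim_equal_dominant_qqmusic_failure := by
  intro attempts _
  unfold Spec_dominant_qqmusic_failure
  rw [a_eq, b_eq]
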